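-- pv_equiv track=rewrite | github.com/narissatsuboi/leetcode | 20. Valid Parentheses/main.py | isValidBF
-- ===== SOURCE A (Python) =====
-- def isValidBF(s):
--     n = len(s)
--     # invalid when len is odd number
--     if n % 2 == 1:
--         return False
--
--     l, r = 0, 1
--
--     while r < n :
--         lChar, rChar = s[l], s[r]
--         isPair1 = lChar == '(' and rChar == ')'
--         isPair2 = lChar == '[' and rChar == ']'
--         isPair3 = lChar == '{' and rChar == '}'
--
--         # must start with an opening brack of any type
--         if isPair1 or isPair2 or isPair3:
--             l += 2
--             r += 2
--         else:
--             return False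
--     return True
-- ===== SOURCE B (Python) =====
-- def isValidBF(s):
--     close = {'(': ')', '[': ']', '{': '}'}
--     evens = [c for i, c in enumerate(s) if i % 2 == 0]
--     odds = [c for i, c in enumerate(s) if i % 2 != 0]
--     return [close.get(c) for c in evens] == odds
-- ===== Notes on version B (the rewrite author's own statement) =====
-- stated objective: alternative
-- what changed: Replaces A's two-pointer while-loop over adjacent pairs with a staged approach: split the string into its even-indexed and odd-indexed subsequences, map a closing-bracket dict over the evens, and test list equality with the odds (odd length makes the lists unequal, so no parity check is needed).
import Mathlib
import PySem

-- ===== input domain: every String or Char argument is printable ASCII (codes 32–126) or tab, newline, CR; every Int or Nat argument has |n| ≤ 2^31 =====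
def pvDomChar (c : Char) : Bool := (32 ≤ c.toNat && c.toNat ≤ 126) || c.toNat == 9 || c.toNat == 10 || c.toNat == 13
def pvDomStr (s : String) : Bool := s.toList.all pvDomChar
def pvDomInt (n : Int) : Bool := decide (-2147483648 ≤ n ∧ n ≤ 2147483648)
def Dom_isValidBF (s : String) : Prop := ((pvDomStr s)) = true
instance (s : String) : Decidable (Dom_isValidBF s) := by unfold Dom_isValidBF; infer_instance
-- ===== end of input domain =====

-- B replaces A's two-pointer pair loop by a staged decomposition: split s into its
-- even-indexed and odd-indexed subsequences, map a closing-bracket dict over the evens,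
-- and compare with the odds; objective: alternative decomposition, same O(n) cost.

-- ===== PORT A =====
-- the while-loop: l, r move by 2; the `| _, _ => false` branch is the (unreachable) IndexError case
def isValidBFLoop (cs : List Char) (n l r : Int) : Bool :=
  if r < n then
    match PySem.List.pyGet? cs l, PySem.List.pyGet? cs r with
    | some lChar, some rChar =>
      let isPair1 := lChar == '(' && rChar == ')'
      let isPair2 := lChar == '[' && rChar == ']'
      let isPair3 := lChar == '{' && rChar == '}'
      if isPair1 || isPair2 || isPair3 then isValidBFLoop cs n (l + 2) (r + 2) else false
    | _, _ => false
  else true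
termination_by (n - r).toNat
decreasing_by omega

def isValidBF (s : String) : Bool :=
  let n := PySem.Str.len s
  if n % 2 == 1 then false
  else isValidBFLoop s.toList n 0 1

-- ===== PORT B =====
def closeDict : PySem.Dict Char Char := PySem.Dict.mk [('(', ')'), ('[', ']'), ('{', '}')]

def isValidBF_alt (s : String) : Bool :=
  let evens := (PySem.List.enumerate s.toList).filterMap
    (fun p => if PySem.Int.mod p.1 2 == 0 then some p.2 else none)
  let odds := (PySem.List.enumerate s.toList).filterMap
    (fun p => if PySem.Int.mod p.1 2 != 0 then some p.2 else none)
  -- Python compares a list of Optional[str] with a list of str; ported via Option Char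
  evens.map (fun c => closeDict.get? c) == odds.map some

-- ===== PRECONDITION & SPEC =====
def Spec_isValidBF (s : String) (out : Bool) : Prop := out = isValidBF_alt s
instance (s : String) (out : Bool) : Decidable (Spec_isValidBF s out) := by unfold Spec_isValidBF; infer_instance

-- ===== CLAIM (what is proved, stated in full; the proofs are below) =====
def Claim_equal_isValidBF : Prop := ∀ (s : String), Dom_isValidBF s → Spec_isValidBF s (isValidBF s)

-- ===== LEMMAS AND PROOFS =====

-- common characterisation: the list splits into matching 2-char bracket blocks
def chk : List Char → Bool
  | [] => true
  | _ :: [] => false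
  | a :: b :: rest =>
      (a == '(' && b == ')' || a == '[' && b == ']' || a == '{' && b == '}') && chk rest

theorem chk_odd (cs : List Char) (h : cs.length % 2 = 1) : chk cs = false := by
  induction cs using chk.induct with
  | case1 => simp at h
  | case2 => simp [chk]
  | case3 a b rest ih =>
    simp only [List.length_cons] at h
    simp [chk, ih (by omega)]

-- A's loop computes chk of the remaining suffix (even total length)
theorem loopA_chk (cs : List Char) (hn : cs.length % 2 = 0) (k : Nat) :
    isValidBFLoop cs (cs.length : Int) ((2 * k : Nat) : Int) ((2 * k + 1 : Nat) : Int)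
      = chk (cs.drop (2 * k)) := by
  rw [isValidBFLoop]
  by_cases h : 2 * k + 1 < cs.length
  · rw [if_pos (by exact_mod_cast h)]
    rw [PySem.List.pyGet?_natCast, PySem.List.pyGet?_natCast,
        List.getElem?_eq_getElem (by omega), List.getElem?_eq_getElem h]
    have hd1 : cs.drop (2 * k) = cs[2 * k] :: cs.drop (2 * k + 1) :=
      List.drop_eq_getElem_cons (by omega)
    have hd2 : cs.drop (2 * k + 1) = cs[2 * k + 1] :: cs.drop (2 * k + 2) :=
      List.drop_eq_getElem_cons h
    rw [hd1, hd2, chk]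
    simp only []
    by_cases hp : (cs[2 * k] == '(' && cs[2 * k + 1] == ')' ||
        cs[2 * k] == '[' && cs[2 * k + 1] == ']' ||
        cs[2 * k] == '{' && cs[2 * k + 1] == '}') = true
    · rw [if_pos hp, hp, Bool.true_and]
      have : ((2 * k : Nat) : Int) + 2 = ((2 * (k + 1) : Nat) : Int) := by push_cast; ring
      have h2 : ((2 * k + 1 : Nat) : Int) + 2 = ((2 * (k + 1) + 1 : Nat) : Int) := by
        push_cast; ring
      have h3 : 2 * (k + 1) = 2 * k + 2 := by ring
      rw [this, h2, loopA_chk cs hn (k + 1), h3]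
    · rw [if_neg hp, Bool.eq_false_iff.mpr hp, Bool.false_and]
  · rw [if_neg (by exact_mod_cast h)]
    have : cs.drop (2 * k) = [] := List.drop_eq_nil_of_le (by omega)
    rw [this, chk]
termination_by cs.length - 2 * k
decreasing_by omega

-- the head comparison of B equals A's three pair tests
theorem head_pair (a b : Char) :
    (closeDict.get? a == some b)
      = (a == '(' && b == ')' || a == '[' && b == ']' || a == '{' && b == '}') := by
  by_cases h1 : a = '('
  · subst h1
    rw [show closeDict.get? '(' = some ')' from rfl, Option.some_beq_some,
      show (('(' : Char) == '(') = true from rfl, show (('(' : Char) == '[') = false from rfl,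
      show (('(' : Char) == '{') = false from rfl]
    simp only [Bool.true_and, Bool.false_and, Bool.or_false]
    exact Bool.beq_comm ..
  · by_cases h2 : a = '['
    · subst h2
      rw [show closeDict.get? '[' = some ']' from rfl, Option.some_beq_some,
        show (('[' : Char) == '(') = false from rfl, show (('[' : Char) == '[') = true from rfl,
        show (('[' : Char) == '{') = false from rfl]
      simp only [Bool.true_and, Bool.false_and, Bool.or_false, Bool.false_or]
      exact Bool.beq_comm ..
    · by_cases h3 : a = '{'
      · subst h3
        rw [show closeDict.get? '{' = some '}' from rfl, Option.some_beq_some,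
          show (('{' : Char) == '(') = false from rfl, show (('{' : Char) == '[') = false from rfl,
          show (('{' : Char) == '{') = true from rfl]
        simp only [Bool.true_and, Bool.false_and, Bool.false_or]
        exact Bool.beq_comm ..
      · have hn : closeDict.get? a = none := by
          simp only [closeDict, PySem.Dict.get?]
          rw [List.find?_cons_of_neg (by simpa using Ne.symm h1),
            List.find?_cons_of_neg (by simpa using Ne.symm h2),
            List.find?_cons_of_neg (by simpa using Ne.symm h3)]
          rfl
        rw [hn, beq_eq_false_iff_ne.mpr h1, beq_eq_false_iff_ne.mpr h2,
          beq_eq_false_iff_ne.mpr h3]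
        simp only [Bool.false_and, Bool.or_self]
        rfl

-- parity of consecutive enumerate indices
theorem mod_even (k : Nat) : (PySem.Int.mod ((2 * k : Nat) : Int) 2 == 0) = true := by
  rw [PySem.Int.mod_eq_emod_of_pos (by omega), beq_iff_eq]; omega

theorem mod_odd (k : Nat) : (PySem.Int.mod (((2 * k : Nat) : Int) + 1) 2 == 0) = false := by
  rw [PySem.Int.mod_eq_emod_of_pos (by omega), beq_eq_false_iff_ne]; omega

-- B's staged comparison, starting the enumeration at any even index, computes chk
theorem stagesB_chk (cs : List Char) (k : Nat) :
    (((PySem.List.enumerate cs ((2 * k : Nat) : Int)).filterMap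
        (fun p => if PySem.Int.mod p.1 2 == 0 then some p.2 else none)).map
          (fun c => closeDict.get? c)
      == ((PySem.List.enumerate cs ((2 * k : Nat) : Int)).filterMap
        (fun p => if PySem.Int.mod p.1 2 != 0 then some p.2 else none)).map some)
      = chk cs := by
  induction cs using chk.induct generalizing k with
  | case1 => simp [chk, PySem.List.enumerate_nil]
  | case2 a =>
    rw [PySem.List.enumerate_cons, PySem.List.enumerate_nil]
    simp only [List.filterMap_cons, List.filterMap_nil, mod_even k, bne, Bool.not_true,
      if_pos, Bool.false_eq_true, if_false, List.map_cons, List.map_nil]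
    simp [chk]
  | case3 a b rest ih =>
    rw [PySem.List.enumerate_cons, PySem.List.enumerate_cons]
    have h2 : ((2 * k : Nat) : Int) + 1 + 1 = ((2 * (k + 1) : Nat) : Int) := by
      push_cast; ring
    rw [h2]
    simp only [List.filterMap_cons, mod_even k, mod_odd k, bne, Bool.not_true, Bool.not_false,
      if_pos, Bool.false_eq_true, if_false, List.map_cons]
    simp only [bne] at ih
    rw [List.cons_beq_cons, head_pair, ih (k + 1)]
    conv_rhs => rw [chk]

theorem alt_eq_chk (s : String) : isValidBF_alt s = chk s.toList := by
  unfold isValidBF_alt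
  rw [show PySem.List.enumerate s.toList = PySem.List.enumerate s.toList ((2 * 0 : Nat) : Int)
    from by norm_num]
  exact stagesB_chk s.toList 0

-- ===== VERDICT (by name: the statement is the Claim_ definition above) =====
theorem isValidBF_spec : Claim_equal_isValidBF := by
  intro s _
  unfold Spec_isValidBF isValidBF
  rw [alt_eq_chk, PySem.Str.len_eq]
  by_cases h : s.toList.length % 2 = 1
  · have hb : (((s.toList.length : Int)) % 2 == 1) = true := by
      rw [beq_iff_eq]; omega
    simp only [hb, if_true, chk_odd s.toList h]
  · have hb : (((s.toList.length : Int)) % 2 == 1) = false := by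
      rw [beq_eq_false_iff_ne]; omega
    simp only [hb, Bool.false_eq_true, if_false]
    have h0 : (0 : Int) = ((2 * 0 : Nat) : Int) := by norm_num
    have h1 : (1 : Int) = ((2 * 0 + 1 : Nat) : Int) := by norm_num
    rw [h0, h1, loopA_chk s.toList (by omega) 0]
    simp
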